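-- pv_equiv track=rewrite | github.com/gaspode-wonder/AoC | python/day07part2.py | count_timelines
-- ===== SOURCE A (Python) =====
-- from collections import deque
--
-- def find_start(grid):
--     for r, row in enumerate(grid):
--         c = row.find('S')
--         if c != -1:
--             return r, c
--     raise ValueError("No S found")
--
-- def count_timelines(grid):
--     h = len(grid)
--     w = max(len(row) for row in grid)
--     grid = [row.ljust(w, '.') for row in grid]
--
--     sr, sc = find_start(grid)
--
--     # ways[r][c] = number of timelines currently at (r, c)
--     ways = {}
--     q = deque()
--     ways[(sr, sc)] = 1
--     q.append((sr, sc))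
--
--     total_timelines = 0
--
--     while q:
--         r, c = q.popleft()
--         count = ways[(r, c)]
--
--         nr = r + 1
--         if nr >= h:
--             # Exiting manifold: this branch contributes its count
--             total_timelines += count
--             continue
--
--         cell = grid[nr][c]
--         if cell == '^':
--             # Branch left and right at same row
--             if c - 1 >= 0:
--                 nxt = (nr, c - 1)
--                 if nxt not in ways:
--                     ways[nxt] = 0
--                 before = ways[nxt]
--                 ways[nxt] += count
--                 if before == 0:
--                     q.append(nxt)
--             if c + 1 < w:
--                 nxt = (nr, c + 1)
--                 if nxt not in ways:
--                     ways[nxt] = 0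
--                 before = ways[nxt]
--                 ways[nxt] += count
--                 if before == 0:
--                     q.append(nxt)
--         else:
--             # Pass-through downward
--             nxt = (nr, c)
--             if nxt not in ways:
--                 ways[nxt] = 0
--             before = ways[nxt]
--             ways[nxt] += count
--             if before == 0:
--                 q.append(nxt)
--
--     return total_timelines
-- ===== SOURCE B (Python) =====
-- def find_start(grid):
--     for r, row in enumerate(grid):
--         c = row.find('S')
--         if c != -1:
--             return r, c
--     raise ValueError("No S found")
--
-- def count_timelines(grid):
--     h = len(grid)
--     w = max(len(row) for row in grid)
--     grid = [row.ljust(w, '.') for row in grid]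
--
--     sr, sc = find_start(grid)
--
--     # Row-by-row sweep: cur maps column -> number of timelines in the current row.
--     total = 0
--     cur = {sc: 1}
--     for r in range(sr, h):
--         nxt = {}
--         for c, cnt in cur.items():
--             if r + 1 >= h:
--                 total += cnt
--             elif grid[r + 1][c] == '^':
--                 if c - 1 >= 0:
--                     nxt[c - 1] = nxt.get(c - 1, 0) + cnt
--                 if c + 1 < w:
--                     nxt[c + 1] = nxt.get(c + 1, 0) + cnt
--             else:
--                 nxt[c] = nxt.get(c, 0) + cnt
--         cur = nxt
--     return total
-- ===== Notes on version B (the rewrite author's own statement) =====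
-- stated objective: simpler
-- what changed: Replaced A's BFS over a deque with a global dict keyed by (row, col) pairs by a plain row-by-row sweep that carries a single column -> count dict for the current row and rebuilds it for the next row.
import Mathlib
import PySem

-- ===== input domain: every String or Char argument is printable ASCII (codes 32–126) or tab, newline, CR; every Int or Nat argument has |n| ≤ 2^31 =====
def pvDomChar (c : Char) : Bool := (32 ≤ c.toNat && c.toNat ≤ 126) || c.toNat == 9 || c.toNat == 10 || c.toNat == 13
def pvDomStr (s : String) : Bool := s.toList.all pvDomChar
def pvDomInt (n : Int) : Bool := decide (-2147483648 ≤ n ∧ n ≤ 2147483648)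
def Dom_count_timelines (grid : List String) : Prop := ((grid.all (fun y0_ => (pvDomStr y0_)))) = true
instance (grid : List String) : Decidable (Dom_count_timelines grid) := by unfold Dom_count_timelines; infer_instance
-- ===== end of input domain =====

-- B replaces A's BFS over a deque keyed by (row, col) with a row-by-row sweep that carries
-- one column -> count dict per row (objective: simpler).

-- ===== PORT A =====

-- row.ljust(w, c): pad on the right to length w (exact for the w ≥ 0 used here)
def pvLjust (s : String) (w : Int) (c : Char) : String :=
  String.ofList (s.toList ++ List.replicate (w.toNat - s.toList.length) c)

-- find_start: first row containing 'S' with the column of its first 'S' (a helper function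
-- in both Pythons, shared verbatim)
def pvFindStart : List String → Int → Option (Int × Int)
  | [], _ => none
  | row :: rest, r =>
    let c := PySem.Str.find row "S"
    if c ≠ -1 then some (r, c) else pvFindStart rest (r + 1)

-- A's thrice-repeated block: if nxt not in ways: ways[nxt] = 0; before = ways[nxt];
-- ways[nxt] += count; if before == 0: q.append(nxt)
def pvPush (ways : PySem.Dict (Int × Int) Int) (q : List (Int × Int)) (k : Int × Int)
    (count : Int) : PySem.Dict (Int × Int) Int × List (Int × Int) :=
  let ways1 := if ways.contains k then ways else ways.insert k 0
  let before := ways1.getD k 0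
  let ways2 := ways1.insert k (before + count)
  let q' := if before = 0 then q ++ [k] else q
  (ways2, q')

-- A's while loop over the deque; the fuel only makes it structural (it strictly exceeds the
-- number of pops, and each pop costs exactly 1)
def pvALoop (h w : Int) (g : List String) :
    Nat → PySem.Dict (Int × Int) Int → List (Int × Int) → Int → Int
  | 0, _, _, total => total
  | _ + 1, _, [], total => total
  | fuel + 1, ways, (r, c) :: q, total =>
    let count := ways.getD (r, c) 0   -- ways[(r, c)]: the key is always present when popped
    if r + 1 ≥ h then
      pvALoop h w g fuel ways q (total + count)
    else
      -- grid[nr][c]: always in range when reached (rows padded to w, 0 ≤ c < w)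
      let cell := (PySem.List.pyGet? g (r + 1)).bind (fun row => PySem.Str.pyGet? row c)
      if cell = some '^' then
        let s1 := if c - 1 ≥ 0 then pvPush ways q (r + 1, c - 1) count else (ways, q)
        let s2 := if c + 1 < w then pvPush s1.1 s1.2 (r + 1, c + 1) count else s1
        pvALoop h w g fuel s2.1 s2.2 total
      else
        let s := pvPush ways q (r + 1, c) count
        pvALoop h w g fuel s.1 s.2 total

def count_timelines (grid : List String) : Int :=
  let h : Int := grid.length
  -- w = max(len(row) for row in grid); raises ValueError on [] (excluded by Pre_)
  let w : Int := (PySem.List.max? (grid.map PySem.Str.len) (fun x => x)).getD 0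
  let g := grid.map (fun row => pvLjust row w '.')
  match pvFindStart g 0 with
  | none => 0   -- Python raises ValueError "No S found"; excluded by Pre_
  | some (sr, sc) =>
      pvALoop h w g ((grid.length + 1) * (w.toNat + 1) + 1)
        (PySem.Dict.empty.insert (sr, sc) 1) [(sr, sc)] 0

-- ===== PORT B =====

-- body of B's inner loop 'for c, cnt in cur.items(): ...'
def pvBStep (h w : Int) (g : List String) (r : Int)
    (acc : PySem.Dict Int Int × Int) (p : Int × Int) : PySem.Dict Int Int × Int :=
  let nxt := acc.1
  let total := acc.2
  let c := p.1
  let cnt := p.2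
  if r + 1 ≥ h then (nxt, total + cnt)
  else if ((PySem.List.pyGet? g (r + 1)).bind (fun row => PySem.Str.pyGet? row c)) = some '^' then
    let nxt1 := if c - 1 ≥ 0 then nxt.insert (c - 1) (nxt.getD (c - 1) 0 + cnt) else nxt
    let nxt2 := if c + 1 < w then nxt1.insert (c + 1) (nxt1.getD (c + 1) 0 + cnt) else nxt1
    (nxt2, total)
  else (nxt.insert c (nxt.getD c 0 + cnt), total)

-- one row of B's sweep
def pvBRow (h w : Int) (g : List String) (r : Int)
    (items : List (Int × Int)) (acc : PySem.Dict Int Int × Int) : PySem.Dict Int Int × Int :=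
  items.foldl (pvBStep h w g r) acc

def count_timelines_alt (grid : List String) : Int :=
  let h : Int := grid.length
  let w : Int := (PySem.List.max? (grid.map PySem.Str.len) (fun x => x)).getD 0
  let g := grid.map (fun row => pvLjust row w '.')
  match pvFindStart g 0 with
  | none => 0   -- Python raises ValueError "No S found"; excluded by Pre_
  | some (sr, sc) =>
      ((PySem.List.pyRange sr h 1).foldl
        (fun st r => pvBRow h w g r st.1.items (PySem.Dict.empty, st.2))
        (PySem.Dict.empty.insert sc 1, 0)).2

-- ===== PRECONDITION & SPEC =====
-- Pre_ excludes exactly the inputs where Python A raises ValueError: grids in which no row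
-- contains 'S' (this also excludes the empty grid, where max() raises ValueError).
def Pre_count_timelines (grid : List String) : Prop :=
  grid.any (fun row => PySem.Str.isIn "S" row) = true
instance (grid : List String) : Decidable (Pre_count_timelines grid) := by
  unfold Pre_count_timelines; infer_instance

def pvWitness_count_timelines : List String := ["..S", ".^."]

def Spec_count_timelines (grid : List String) (out : Int) : Prop := out = count_timelines_alt grid
instance (grid : List String) (out : Int) : Decidable (Spec_count_timelines grid out) := by
  unfold Spec_count_timelines; infer_instance

-- ===== CLAIM (what is proved, stated in full; the proofs are below) =====
def Claim_equal_count_timelines : Prop := ∀ (grid : List String), Dom_count_timelines grid → Pre_count_timelines grid → Spec_count_timelines grid (count_timelines grid)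

-- ===== LEMMAS AND PROOFS =====

theorem pvPush_spec (ways : PySem.Dict (Int × Int) Int) (q : List (Int × Int))
    (k : Int × Int) (cnt : Int) :
    pvPush ways q k cnt =
      (ways.insert k (ways.getD k 0 + cnt), if ways.getD k 0 = 0 then q ++ [k] else q) := by
  unfold pvPush
  by_cases hc : ways.contains k
  · simp [hc]
  · simp only [Bool.not_eq_true] at hc
    simp [hc, PySem.Dict.getD_insert_self, PySem.Dict.insert_insert_self,
      PySem.Dict.getD_of_not_contains ways 0 hc]

theorem getD_nonneg (nxt : PySem.Dict Int Int)
    (hpos : ∀ c, nxt.contains c = true → 0 < nxt.getD c 0) (c : Int) : 0 ≤ nxt.getD c 0 := by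
  by_cases hc : nxt.contains c
  · exact le_of_lt (hpos c hc)
  · simp only [Bool.not_eq_true] at hc
    simp [PySem.Dict.getD_of_not_contains nxt 0 hc]

theorem contains_insert_pos (nxt : PySem.Dict Int Int) (k v : Int)
    (hpos : ∀ c, nxt.contains c = true → 0 < nxt.getD c 0) (hv : 0 < v) :
    ∀ c, (nxt.insert k v).contains c = true → 0 < (nxt.insert k v).getD c 0 := by
  intro c hc
  rw [PySem.Dict.getD_insert]
  by_cases h : c = k
  · rw [if_pos h]; exact hv
  · rw [if_neg h]
    rw [PySem.Dict.contains_insert] at hc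
    rcases Bool.or_eq_true_iff.mp hc with h' | h'
    · exact absurd (by simpa using h') h
    · exact hpos c h'

theorem pvPush_sim (r : Int)
    (ways : PySem.Dict (Int × Int) Int) (nxt : PySem.Dict Int Int)
    (rest : List (Int × Int)) (c' cnt : Int) (hcnt : 0 < cnt)
    (q : List (Int × Int))
    (hq : q = rest.map (fun p => (r, p.1)) ++ nxt.keys.map (fun c => (r + 1, c)))
    (H2 : ∀ c, ways.getD (r + 1, c) 0 = nxt.getD c 0)
    (H3 : ∀ c, ways.contains (r + 1, c) = nxt.contains c)
    (H4 : ∀ c, nxt.contains c = true → 0 < nxt.getD c 0) :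
    (pvPush ways q (r + 1, c') cnt).2
        = rest.map (fun p => (r, p.1))
          ++ (nxt.insert c' (nxt.getD c' 0 + cnt)).keys.map (fun c => (r + 1, c))
    ∧ (∀ c, (pvPush ways q (r + 1, c') cnt).1.getD (r + 1, c) 0
        = (nxt.insert c' (nxt.getD c' 0 + cnt)).getD c 0)
    ∧ (∀ c, (pvPush ways q (r + 1, c') cnt).1.contains (r + 1, c)
        = (nxt.insert c' (nxt.getD c' 0 + cnt)).contains c)
    ∧ (∀ c, (nxt.insert c' (nxt.getD c' 0 + cnt)).contains c = true
        → 0 < (nxt.insert c' (nxt.getD c' 0 + cnt)).getD c 0)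
    ∧ (∀ x, (pvPush ways q (r + 1, c') cnt).1.getD (r, x) 0 = ways.getD (r, x) 0)
    ∧ (∀ r' x, r + 1 < r' →
        (pvPush ways q (r + 1, c') cnt).1.contains (r', x) = ways.contains (r', x)) := by
  rw [pvPush_spec]
  refine ⟨?_, ?_, ?_, ?_, ?_, ?_⟩
  · -- queue shape
    rw [H2 c']
    by_cases hc : nxt.contains c' = true
    · rw [if_neg (by have := H4 c' hc; omega), hq,
        PySem.Dict.keys_insert_of_contains _ _ hc]
    · simp only [Bool.not_eq_true] at hc
      rw [if_pos (PySem.Dict.getD_of_not_contains nxt 0 hc), hq,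
        PySem.Dict.keys_insert_of_not_contains _ _ hc]
      simp only [List.map_append, List.map_cons, List.map_nil, List.append_assoc]
  · intro c
    rw [PySem.Dict.getD_insert, PySem.Dict.getD_insert]
    by_cases h : c = c'
    · simp [h, H2 c']
    · simp only [Prod.mk.injEq, true_and, h, if_false]
      exact H2 c
  · intro c
    rw [PySem.Dict.contains_insert, PySem.Dict.contains_insert, H3 c]
    by_cases h : c = c'
    · simp [h]
    · have h1 : ((((r : Int) + 1, c) : Int × Int) == ((r : Int) + 1, c')) = false := by
        simp only [beq_eq_false_iff_ne, ne_eq, Prod.mk.injEq, not_and]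
        intro _; exact h
      have h2 : (c == c') = false := beq_eq_false_iff_ne.mpr h
      rw [h1, h2]
  · intro c
    exact contains_insert_pos nxt c' _ H4 (by have := getD_nonneg nxt H4 c'; omega) c
  · intro x
    rw [PySem.Dict.getD_insert]
    simp
  · intro r' x hr'
    rw [PySem.Dict.contains_insert]
    have : ((r', x) == ((r : Int) + 1, c')) = false := by
      simp only [beq_eq_false_iff_ne, ne_eq, Prod.mk.injEq, not_and]
      intro h; omega
    simp [this]

theorem pvPushCond_sim (cond : Prop) [Decidable cond] (r : Int)
    (ways : PySem.Dict (Int × Int) Int) (q : List (Int × Int)) (nxt : PySem.Dict Int Int)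
    (rest : List (Int × Int)) (c' cnt : Int) (hcnt : 0 < cnt)
    (s0 : PySem.Dict (Int × Int) Int × List (Int × Int)) (hs0 : s0 = (ways, q))
    (hq : q = rest.map (fun p => (r, p.1)) ++ nxt.keys.map (fun c => (r + 1, c)))
    (H2 : ∀ c, ways.getD (r + 1, c) 0 = nxt.getD c 0)
    (H3 : ∀ c, ways.contains (r + 1, c) = nxt.contains c)
    (H4 : ∀ c, nxt.contains c = true → 0 < nxt.getD c 0) :
    (if cond then pvPush ways q (r + 1, c') cnt else s0).2
        = rest.map (fun p => (r, p.1))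
          ++ (if cond then nxt.insert c' (nxt.getD c' 0 + cnt) else nxt).keys.map
              (fun c => (r + 1, c))
    ∧ (∀ c, (if cond then pvPush ways q (r + 1, c') cnt else s0).1.getD (r + 1, c) 0
        = (if cond then nxt.insert c' (nxt.getD c' 0 + cnt) else nxt).getD c 0)
    ∧ (∀ c, (if cond then pvPush ways q (r + 1, c') cnt else s0).1.contains (r + 1, c)
        = (if cond then nxt.insert c' (nxt.getD c' 0 + cnt) else nxt).contains c)
    ∧ (∀ c, (if cond then nxt.insert c' (nxt.getD c' 0 + cnt) else nxt).contains c = true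
        → 0 < (if cond then nxt.insert c' (nxt.getD c' 0 + cnt) else nxt).getD c 0)
    ∧ (∀ x, (if cond then pvPush ways q (r + 1, c') cnt else s0).1.getD (r, x) 0
        = ways.getD (r, x) 0)
    ∧ (∀ r' x, r + 1 < r' →
        (if cond then pvPush ways q (r + 1, c') cnt else s0).1.contains (r', x)
          = ways.contains (r', x)) := by
  by_cases hcond : cond
  · simp only [if_pos hcond]
    exact pvPush_sim r ways nxt rest c' cnt hcnt q hq H2 H3 H4
  · simp only [if_neg hcond, hs0]
    exact ⟨hq, H2, H3, H4, by intro x; trivial, by intro r' x h; trivial⟩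




theorem pvALoop_cons (h w : Int) (g : List String) (fuel : Nat)
    (ways : PySem.Dict (Int × Int) Int) (r c : Int) (q : List (Int × Int)) (total : Int) :
    pvALoop h w g (fuel + 1) ways ((r, c) :: q) total =
      (let count := ways.getD (r, c) 0
       if r + 1 ≥ h then pvALoop h w g fuel ways q (total + count)
       else
         let cell := (PySem.List.pyGet? g (r + 1)).bind (fun row => PySem.Str.pyGet? row c)
         if cell = some '^' then
           let s1 := if c - 1 ≥ 0 then pvPush ways q (r + 1, c - 1) count else (ways, q)
           let s2 := if c + 1 < w then pvPush s1.1 s1.2 (r + 1, c + 1) count else s1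
           pvALoop h w g fuel s2.1 s2.2 total
         else
           let s := pvPush ways q (r + 1, c) count
           pvALoop h w g fuel s.1 s.2 total) := rfl

theorem pvALoop_row (h W : Int) (g : List String) (r : Int) (rest : List (Int × Int)) :
    ∀ (ways : PySem.Dict (Int × Int) Int) (nxt : PySem.Dict Int Int) (total : Int),
    (∀ p ∈ rest, ways.getD (r, p.1) 0 = p.2) →
    (∀ p ∈ rest, 0 < p.2) →
    (∀ c, ways.getD (r + 1, c) 0 = nxt.getD c 0) →
    (∀ c, ways.contains (r + 1, c) = nxt.contains c) →
    (∀ c, nxt.contains c = true → 0 < nxt.getD c 0) →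
    (∀ r' c, r + 1 < r' → ways.contains (r', c) = false) →
    ∀ fuel : Nat,
    ∃ ways' : PySem.Dict (Int × Int) Int,
      pvALoop h W g (rest.length + fuel) ways
          (rest.map (fun p => (r, p.1)) ++ nxt.keys.map (fun c => (r + 1, c))) total
        = pvALoop h W g fuel ways'
            ((pvBRow h W g r rest (nxt, total)).1.keys.map (fun c => (r + 1, c)))
            (pvBRow h W g r rest (nxt, total)).2
      ∧ (∀ c, ways'.getD (r + 1, c) 0 = (pvBRow h W g r rest (nxt, total)).1.getD c 0)
      ∧ (∀ c, ways'.contains (r + 1, c) = (pvBRow h W g r rest (nxt, total)).1.contains c)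
      ∧ (∀ r' c, r + 1 < r' → ways'.contains (r', c) = false) := by
  induction rest with
  | nil =>
    intro ways nxt total H1 H5 H2 H3 H4 HF fuel
    simp only [List.length_nil, Nat.zero_add, List.map_nil, List.nil_append]
    exact ⟨ways, rfl, H2, H3, HF⟩
  | cons p rest ih =>
    intro ways nxt total H1 H5 H2 H3 H4 HF fuel
    have hcnt0 : ways.getD (r, p.1) 0 = p.2 := H1 p (by simp)
    have hpos : 0 < p.2 := H5 p (by simp)
    have hlen : (p :: rest).length + fuel = (rest.length + fuel) + 1 := by
      simp only [List.length_cons]; omega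
    rw [hlen]
    simp only [List.map_cons, List.cons_append]
    rw [pvALoop_cons]
    have hBrow : pvBRow h W g r (p :: rest) (nxt, total)
        = pvBRow h W g r rest (pvBStep h W g r (nxt, total) p) := rfl
    rw [hBrow]
    dsimp only
    rw [hcnt0]
    by_cases hge : r + 1 ≥ h
    · rw [if_pos hge]
      have hstep : pvBStep h W g r (nxt, total) p = (nxt, total + p.2) := by
        unfold pvBStep; dsimp only; rw [if_pos hge]
      rw [hstep]
      exact ih ways nxt (total + p.2) (fun q hq => H1 q (List.mem_cons_of_mem _ hq))
        (fun q hq => H5 q (List.mem_cons_of_mem _ hq)) H2 H3 H4 HF fuel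
    · rw [if_neg hge]
      by_cases hcell :
          ((PySem.List.pyGet? g (r + 1)).bind (fun row => PySem.Str.pyGet? row p.1)) = some '^'
      · rw [if_pos hcell]
        set Q := rest.map (fun p => (r, p.1)) ++ nxt.keys.map (fun c => (r + 1, c)) with hQdef
        set S1 := if p.1 - 1 ≥ 0 then pvPush ways Q (r + 1, p.1 - 1) p.2 else (ways, Q) with hS1
        set N1 := if p.1 - 1 ≥ 0 then nxt.insert (p.1 - 1) (nxt.getD (p.1 - 1) 0 + p.2) else nxt
          with hN1
        set S2 := if p.1 + 1 < W then pvPush S1.1 S1.2 (r + 1, p.1 + 1) p.2 else S1 with hS2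
        set N2 := if p.1 + 1 < W then N1.insert (p.1 + 1) (N1.getD (p.1 + 1) 0 + p.2) else N1
          with hN2
        obtain ⟨hq1, hgd1, hct1, hpos1, hrow1, hfr1⟩ :
            S1.2 = rest.map (fun p => (r, p.1)) ++ N1.keys.map (fun c => (r + 1, c))
            ∧ (∀ c, S1.1.getD (r + 1, c) 0 = N1.getD c 0)
            ∧ (∀ c, S1.1.contains (r + 1, c) = N1.contains c)
            ∧ (∀ c, N1.contains c = true → 0 < N1.getD c 0)
            ∧ (∀ x, S1.1.getD (r, x) 0 = ways.getD (r, x) 0)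
            ∧ (∀ r' x, r + 1 < r' → S1.1.contains (r', x) = ways.contains (r', x)) := by
          rw [hS1, hN1]
          exact pvPushCond_sim (p.1 - 1 ≥ 0) r ways Q nxt rest (p.1 - 1) p.2 hpos
            (ways, Q) rfl hQdef H2 H3 H4
        obtain ⟨hq2, hgd2, hct2, hpos2, hrow2, hfr2⟩ :
            S2.2 = rest.map (fun p => (r, p.1)) ++ N2.keys.map (fun c => (r + 1, c))
            ∧ (∀ c, S2.1.getD (r + 1, c) 0 = N2.getD c 0)
            ∧ (∀ c, S2.1.contains (r + 1, c) = N2.contains c)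
            ∧ (∀ c, N2.contains c = true → 0 < N2.getD c 0)
            ∧ (∀ x, S2.1.getD (r, x) 0 = S1.1.getD (r, x) 0)
            ∧ (∀ r' x, r + 1 < r' → S2.1.contains (r', x) = S1.1.contains (r', x)) := by
          rw [hS2, hN2]
          exact pvPushCond_sim (p.1 + 1 < W) r S1.1 S1.2 N1 rest (p.1 + 1) p.2 hpos
            S1 rfl hq1 hgd1 hct1 hpos1
        have hstep : pvBStep h W g r (nxt, total) p = (N2, total) := by
          rw [hN2, hN1]
          unfold pvBStep
          dsimp only
          rw [if_neg hge, if_pos hcell]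
        rw [hstep]
        obtain ⟨ways', heq, hgd, hct, hfr⟩ :=
          ih S2.1 N2 total
            (fun q hq => by
              rw [hrow2 q.1, hrow1 q.1]; exact H1 q (List.mem_cons_of_mem _ hq))
            (fun q hq => H5 q (List.mem_cons_of_mem _ hq))
            hgd2 hct2 hpos2
            (fun r' c hlt => by
              rw [hfr2 r' c hlt, hfr1 r' c hlt]; exact HF r' c (by omega))
            fuel
        refine ⟨ways', ?_, hgd, hct, hfr⟩
        rw [hq2]
        exact heq
      · rw [if_neg hcell]
        set Q := rest.map (fun p => (r, p.1)) ++ nxt.keys.map (fun c => (r + 1, c)) with hQdef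
        obtain ⟨hq1, hgd1, hct1, hpos1, hrow1, hfr1⟩ :=
          pvPush_sim r ways nxt rest p.1 p.2 hpos Q hQdef H2 H3 H4
        have hstep : pvBStep h W g r (nxt, total) p =
            (nxt.insert p.1 (nxt.getD p.1 0 + p.2), total) := by
          unfold pvBStep; dsimp only; rw [if_neg hge, if_neg hcell]
        rw [hstep]
        obtain ⟨ways', heq, hgd, hct, hfr⟩ :=
          ih (pvPush ways Q (r + 1, p.1) p.2).1 (nxt.insert p.1 (nxt.getD p.1 0 + p.2)) total
            (fun q hq => by rw [hrow1 q.1]; exact H1 q (List.mem_cons_of_mem _ hq))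
            (fun q hq => H5 q (List.mem_cons_of_mem _ hq))
            hgd1 hct1 hpos1
            (fun r' c hlt => by rw [hfr1 r' c hlt]; exact HF r' c (by omega))
            fuel
        refine ⟨ways', ?_, hgd, hct, hfr⟩
        rw [hq1]
        exact heq

theorem pvBStep_pos (h W : Int) (g : List String) (r : Int)
    (nxt : PySem.Dict Int Int) (total : Int) (p : Int × Int)
    (hp : 0 < p.2)
    (hpos : ∀ c, nxt.contains c = true → 0 < nxt.getD c 0) :
    ∀ c, (pvBStep h W g r (nxt, total) p).1.contains c = true →
      0 < (pvBStep h W g r (nxt, total) p).1.getD c 0 := by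
  have hb : ∀ (d : PySem.Dict Int Int) (k : Int),
      (∀ c, d.contains c = true → 0 < d.getD c 0) →
      ∀ c, (d.insert k (d.getD k 0 + p.2)).contains c = true →
        0 < (d.insert k (d.getD k 0 + p.2)).getD c 0 := by
    intro d k hd
    exact contains_insert_pos d k _ hd (by have := getD_nonneg d hd k; omega)
  unfold pvBStep
  dsimp only
  split_ifs
  all_goals dsimp only
  all_goals first
    | exact hpos
    | exact hb _ _ hpos
    | exact hb _ _ (hb _ _ hpos)

theorem pvBRow_pos (h W : Int) (g : List String) (r : Int) :
    ∀ (rest : List (Int × Int)) (nxt : PySem.Dict Int Int) (total : Int),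
    (∀ p ∈ rest, 0 < p.2) →
    (∀ c, nxt.contains c = true → 0 < nxt.getD c 0) →
    ∀ c, (pvBRow h W g r rest (nxt, total)).1.contains c = true →
      0 < (pvBRow h W g r rest (nxt, total)).1.getD c 0 := by
  intro rest
  induction rest with
  | nil => intro nxt total _ hpos; exact hpos
  | cons p rest ih =>
    intro nxt total hrest hpos
    have hstep := pvBStep_pos h W g r nxt total p (hrest p (by simp)) hpos
    exact ih (pvBStep h W g r (nxt, total) p).1 (pvBStep h W g r (nxt, total) p).2
      (fun q hq => hrest q (List.mem_cons_of_mem _ hq)) hstep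

theorem contains_insert_range (W : Int) (nxt : PySem.Dict Int Int) (k v : Int)
    (hr : ∀ c, nxt.contains c = true → 0 ≤ c ∧ c < W) (hk : 0 ≤ k ∧ k < W) :
    ∀ c, (nxt.insert k v).contains c = true → 0 ≤ c ∧ c < W := by
  intro c hc
  rw [PySem.Dict.contains_insert] at hc
  rcases Bool.or_eq_true_iff.mp hc with h | h
  · obtain rfl : c = k := by simpa using h
    exact hk
  · exact hr c h

theorem pvBStep_range (h W : Int) (g : List String) (r : Int)
    (nxt : PySem.Dict Int Int) (total : Int) (p : Int × Int)
    (hp : 0 ≤ p.1 ∧ p.1 < W)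
    (hr : ∀ c, nxt.contains c = true → 0 ≤ c ∧ c < W) :
    ∀ c, (pvBStep h W g r (nxt, total) p).1.contains c = true → 0 ≤ c ∧ c < W := by
  unfold pvBStep
  dsimp only
  split_ifs with h1 h2 h3 h4
  all_goals dsimp only
  all_goals first
    | exact hr
    | exact contains_insert_range W _ _ _ hr (by omega)
    | exact contains_insert_range W _ _ _ (contains_insert_range W _ _ _ hr (by omega)) (by omega)

theorem pvBRow_range (h W : Int) (g : List String) (r : Int) :
    ∀ (rest : List (Int × Int)) (nxt : PySem.Dict Int Int) (total : Int),
    (∀ p ∈ rest, 0 ≤ p.1 ∧ p.1 < W) →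
    (∀ c, nxt.contains c = true → 0 ≤ c ∧ c < W) →
    ∀ c, (pvBRow h W g r rest (nxt, total)).1.contains c = true → 0 ≤ c ∧ c < W := by
  intro rest
  induction rest with
  | nil => intro nxt total _ hr; exact hr
  | cons p rest ih =>
    intro nxt total hrest hr
    have hstep := pvBStep_range h W g r nxt total p (hrest p (by simp)) hr
    exact ih (pvBStep h W g r (nxt, total) p).1 (pvBStep h W g r (nxt, total) p).2
      (fun q hq => hrest q (List.mem_cons_of_mem _ hq)) hstep

theorem pvBStep_nodup (h W : Int) (g : List String) (r : Int)
    (nxt : PySem.Dict Int Int) (total : Int) (p : Int × Int)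
    (hn : nxt.keys.Nodup) : (pvBStep h W g r (nxt, total) p).1.keys.Nodup := by
  unfold pvBStep
  dsimp only
  split_ifs
  all_goals dsimp only
  all_goals first
    | exact hn
    | exact PySem.Dict.nodup_keys_insert _ _ _ hn
    | exact PySem.Dict.nodup_keys_insert _ _ _ (PySem.Dict.nodup_keys_insert _ _ _ hn)

theorem pvBRow_nodup (h W : Int) (g : List String) (r : Int) :
    ∀ (rest : List (Int × Int)) (nxt : PySem.Dict Int Int) (total : Int),
    nxt.keys.Nodup → (pvBRow h W g r rest (nxt, total)).1.keys.Nodup := by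
  intro rest
  induction rest with
  | nil => intro nxt total hn; exact hn
  | cons p rest ih =>
    intro nxt total hn
    exact ih (pvBStep h W g r (nxt, total) p).1 (pvBStep h W g r (nxt, total) p).2
      (pvBStep_nodup h W g r nxt total p hn)

theorem pvBRow_exit (h W : Int) (g : List String) (r : Int) (hx : h ≤ r + 1) :
    ∀ (rest : List (Int × Int)) (nxt : PySem.Dict Int Int) (total : Int),
    (pvBRow h W g r rest (nxt, total)).1 = nxt := by
  intro rest
  induction rest with
  | nil => intro nxt total; rfl
  | cons p rest ih =>
    intro nxt total
    have hstep : pvBStep h W g r (nxt, total) p = (nxt, total + p.2) := by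
      unfold pvBStep; dsimp only; rw [if_pos (by omega : r + 1 ≥ h)]
    have : pvBRow h W g r (p :: rest) (nxt, total)
        = pvBRow h W g r rest (pvBStep h W g r (nxt, total) p) := rfl
    rw [this, hstep]
    exact ih nxt (total + p.2)

theorem pvALoop_sweep (h W : Int) (g : List String) :
    ∀ (n : Nat) (r : Int) (cur : PySem.Dict Int Int) (ways : PySem.Dict (Int × Int) Int)
      (total : Int),
    (h - r).toNat = n →
    r < h →
    cur.keys.Nodup →
    (∀ p ∈ cur.items, ways.getD (r, p.1) 0 = p.2) →
    (∀ c, cur.contains c = true → 0 < cur.getD c 0) →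
    (∀ c, cur.contains c = true → 0 ≤ c ∧ c < W) →
    (∀ r' c, r < r' → ways.contains (r', c) = false) →
    ∀ fuel : Nat, n * W.toNat + 1 ≤ fuel →
    pvALoop h W g fuel ways (cur.keys.map (fun c => (r, c))) total
      = ((PySem.List.pyRange r h 1).foldl
          (fun st rr => pvBRow h W g rr st.1.items (PySem.Dict.empty, st.2)) (cur, total)).2 := by
  intro n
  induction n using Nat.strong_induction_on with
  | _ n ih =>
    intro r cur ways total hn hrlt hnodup H1 Hpos Hrange HF fuel hfuel
    have hn1 : 1 ≤ n := by omega
    -- |cur| ≤ W.toNat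
    have hsub : cur.keys ⊆ PySem.List.pyRange 0 W 1 := by
      intro c hc
      exact PySem.List.mem_pyRange_one.mpr
        (by simpa using Hrange c ((PySem.Dict.contains_iff_mem_keys cur c).mpr hc))
    have hlen_le : cur.items.length ≤ W.toNat := by
      have h1 := (List.subperm_of_subset hnodup hsub).length_le
      rw [PySem.List.length_pyRange_one] at h1
      have h2 : cur.keys.length = cur.items.length := by
        simp [PySem.Dict.keys]
      omega
    have hWle : W.toNat ≤ n * W.toNat := Nat.le_mul_of_pos_left _ (by omega)
    -- queue shape
    have hqueue : cur.keys.map (fun c => (r, c))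
        = cur.items.map (fun p => (r, p.1))
          ++ (PySem.Dict.empty : PySem.Dict Int Int).keys.map (fun c => (r + 1, c)) := by
      simp [PySem.Dict.keys, List.map_map, Function.comp, PySem.Dict.empty]
    -- items facts
    have Hitems_pos : ∀ p ∈ cur.items, 0 < p.2 := by
      intro p hp
      have hc : cur.contains p.1 = true :=
        (PySem.Dict.contains_iff_mem_keys cur p.1).mpr (PySem.Dict.mem_keys_of_mem_items cur hp)
      have := Hpos p.1 hc
      rwa [PySem.Dict.getD_of_mem_items cur (by exact hp) hnodup 0] at this
    have Hitems_range : ∀ p ∈ cur.items, 0 ≤ p.1 ∧ p.1 < W := by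
      intro p hp
      exact Hrange p.1
        ((PySem.Dict.contains_iff_mem_keys cur p.1).mpr (PySem.Dict.mem_keys_of_mem_items cur hp))
    obtain ⟨ways', heq, hgd, hct, hfr⟩ :=
      pvALoop_row h W g r cur.items ways PySem.Dict.empty total H1 Hitems_pos
        (fun c => by
          rw [PySem.Dict.getD_of_not_contains ways 0 (HF (r + 1) c (by omega))]
          simp [PySem.Dict.getD_empty])
        (fun c => by
          rw [HF (r + 1) c (by omega)]
          simp [PySem.Dict.contains_empty])
        (fun c hc => by simp [PySem.Dict.contains_empty] at hc)
        (fun r' c hlt => HF r' c (by omega))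
        (fuel - cur.items.length)
    have hfuel_split : cur.items.length + (fuel - cur.items.length) = fuel := by omega
    rw [hfuel_split] at heq
    rw [hqueue, heq]
    -- peel one row on the B side
    rw [PySem.List.pyRange_one_cons hrlt, List.foldl_cons]
    by_cases hterm : h ≤ r + 1
    · -- last row: nxt' = empty, remaining range empty
      rw [PySem.List.pyRange_one_eq_nil hterm, List.foldl_nil]
      have hx : (pvBRow h W g r cur.items (PySem.Dict.empty, total)).1 = PySem.Dict.empty :=
        pvBRow_exit h W g r hterm cur.items PySem.Dict.empty total
      rw [hx]
      have hkeys : (PySem.Dict.empty : PySem.Dict Int Int).keys = [] := rfl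
      rw [hkeys, List.map_nil]
      obtain ⟨m, hm⟩ : ∃ m, fuel - cur.items.length = m + 1 :=
        ⟨fuel - cur.items.length - 1, by omega⟩
      rw [hm]
      rfl
    · -- more rows below
      push Not at hterm
      exact ih (n - 1) (by omega) (r + 1)
        (pvBRow h W g r cur.items (PySem.Dict.empty, total)).1 ways'
        (pvBRow h W g r cur.items (PySem.Dict.empty, total)).2
        (by omega) hterm
        (pvBRow_nodup h W g r cur.items PySem.Dict.empty total (by simp [PySem.Dict.keys, PySem.Dict.empty]))
        (fun p hp => by
          rw [hgd p.1]
          exact PySem.Dict.getD_of_mem_items _ hp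
            (pvBRow_nodup h W g r cur.items PySem.Dict.empty total (by simp [PySem.Dict.keys, PySem.Dict.empty])) 0)
        (pvBRow_pos h W g r cur.items PySem.Dict.empty total Hitems_pos
          (fun c hc => by simp [PySem.Dict.contains_empty] at hc))
        (pvBRow_range h W g r cur.items PySem.Dict.empty total Hitems_range
          (fun c hc => by simp [PySem.Dict.contains_empty] at hc))
        (fun r' c hlt => hfr r' c (by omega))
        (fuel - cur.items.length) (by
          have : n * W.toNat = (n - 1) * W.toNat + W.toNat := by
            cases n with
            | zero => omega
            | succ m => simp [Nat.succ_mul]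
          omega)

theorem pvFindStart_spec :
    ∀ (l : List String) (r0 sr sc : Int),
    pvFindStart l r0 = some (sr, sc) →
    r0 ≤ sr ∧ sr < r0 + l.length ∧
      ∃ row ∈ l, sc = PySem.Str.find row "S" ∧ PySem.Str.find row "S" ≠ -1 := by
  intro l
  induction l with
  | nil => intro r0 sr sc h; simp [pvFindStart] at h
  | cons row rest ih =>
    intro r0 sr sc h
    unfold pvFindStart at h
    dsimp only at h
    by_cases hf : PySem.Str.find row "S" ≠ -1
    · rw [if_pos hf] at h
      obtain ⟨rfl, rfl⟩ : r0 = sr ∧ PySem.Str.find row "S" = sc := by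
        constructor <;> [exact congrArg Prod.fst (Option.some.inj h);
          exact congrArg Prod.snd (Option.some.inj h)]
      refine ⟨le_refl _, ?_, ⟨row, by simp, rfl, hf⟩⟩
      simp only [List.length_cons]
      push_cast
      omega
    · rw [if_neg hf] at h
      obtain ⟨h1, h2, row', hrow', h3⟩ := ih (r0 + 1) sr sc h
      refine ⟨by omega, ?_, row', List.mem_cons_of_mem _ hrow', h3⟩
      simp only [List.length_cons]
      push_cast
      omega

theorem pvTop (grid : List String) (W : Int) (g : List String) (sr sc : Int)
    (hsr0 : 0 ≤ sr) (hsrlt : sr < (grid.length : Int))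
    (hscnn : 0 ≤ sc) (hsclt : sc < W) :
    pvALoop (grid.length : Int) W g ((grid.length + 1) * (W.toNat + 1) + 1)
        (PySem.Dict.empty.insert (sr, sc) 1) [(sr, sc)] 0
      = ((PySem.List.pyRange sr (grid.length : Int) 1).foldl
          (fun st r => pvBRow (grid.length : Int) W g r st.1.items (PySem.Dict.empty, st.2))
          (PySem.Dict.empty.insert sc 1, 0)).2 := by
  have hkeys : ((PySem.Dict.empty : PySem.Dict Int Int).insert sc (1 : Int)).keys = [sc] := by
    rw [PySem.Dict.keys_insert_of_not_contains _ _ (PySem.Dict.contains_empty sc)]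
    rfl
  have hitems : ((PySem.Dict.empty : PySem.Dict Int Int).insert sc (1 : Int)).items
      = [(sc, 1)] := by
    rw [PySem.Dict.items_insert_of_not_contains _ _ (PySem.Dict.contains_empty sc)]
    rfl
  have hmain := pvALoop_sweep (grid.length : Int) W g ((grid.length : Int) - sr).toNat sr
    (PySem.Dict.empty.insert sc 1) (PySem.Dict.empty.insert (sr, sc) 1) 0 rfl hsrlt
    (by rw [hkeys]; simp)
    (by
      intro p hp
      rw [hitems] at hp
      simp only [List.mem_singleton] at hp
      subst hp
      exact PySem.Dict.getD_insert_self _ _ _ _)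
    (by
      intro c hc
      rw [PySem.Dict.contains_insert] at hc
      simp only [PySem.Dict.contains_empty, Bool.or_false, beq_iff_eq] at hc
      subst hc
      rw [PySem.Dict.getD_insert_self]
      norm_num)
    (by
      intro c hc
      rw [PySem.Dict.contains_insert] at hc
      simp only [PySem.Dict.contains_empty, Bool.or_false, beq_iff_eq] at hc
      subst hc
      exact ⟨hscnn, hsclt⟩)
    (by
      intro r' c hlt
      rw [PySem.Dict.contains_insert]
      have hb : (((r', c) : Int × Int) == (sr, sc)) = false := by
        simp only [beq_eq_false_iff_ne, ne_eq, Prod.mk.injEq, not_and]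
        intro hx; omega
      rw [hb, PySem.Dict.contains_empty]
      rfl)
    ((grid.length + 1) * (W.toNat + 1) + 1)
    (by
      have hle1 : ((grid.length : Int) - sr).toNat ≤ grid.length := by omega
      have h2 : ((grid.length : Int) - sr).toNat * W.toNat ≤ grid.length * W.toNat :=
        Nat.mul_le_mul_right _ hle1
      have h3 : (grid.length + 1) * (W.toNat + 1)
          = grid.length * W.toNat + grid.length + W.toNat + 1 := by ring
      omega)
  rw [hkeys] at hmain
  simpa using hmain

-- ===== VERDICT (by name: the statement is the Claim_ definition above) =====
theorem count_timelines_spec : Claim_equal_count_timelines := by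
  intro grid _ hpre
  unfold Spec_count_timelines
  have hne : grid ≠ [] := by
    intro he
    rw [he] at hpre
    simp [Pre_count_timelines] at hpre
  simp only [count_timelines, count_timelines_alt]
  rcases hfs : pvFindStart (grid.map (fun row =>
      pvLjust row ((PySem.List.max? (grid.map PySem.Str.len) (fun x => x)).getD 0) '.')) 0
    with _ | ⟨sr, sc⟩
  · rfl
  · -- facts about W
    obtain ⟨m, hm⟩ : ∃ m, PySem.List.max? (grid.map PySem.Str.len) (fun x => x) = some m := by
      cases hx : PySem.List.max? (grid.map PySem.Str.len) (fun x => x) with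
      | none =>
        exact absurd (List.map_eq_nil_iff.mp ((PySem.List.max?_eq_none_iff _ _).mp hx)) hne
      | some m => exact ⟨m, rfl⟩
    have hWm : (PySem.List.max? (grid.map PySem.Str.len) (fun x => x)).getD 0 = m := by
      rw [hm]; rfl
    rw [hWm] at hfs ⊢
    have hm0 : 0 ≤ m := by
      obtain ⟨row, _, hr⟩ := List.mem_map.mp (PySem.List.max?_mem hm)
      rw [← hr, PySem.Str.len_eq]
      positivity
    have hmge : ∀ row ∈ grid, (row.toList.length : Int) ≤ m := by
      intro row hr
      have := PySem.List.max?_isMax hm (PySem.Str.len row) (List.mem_map_of_mem hr)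
      rwa [PySem.Str.len_eq] at this
    have hrowlen : ∀ row ∈ grid.map (fun row => pvLjust row m '.'),
        (row.toList.length : Int) = m := by
      intro row hr
      obtain ⟨row0, hrow0, rfl⟩ := List.mem_map.mp hr
      have hle : row0.toList.length ≤ m.toNat := by
        have := hmge row0 hrow0; omega
      unfold pvLjust
      rw [String.toList_ofList]
      simp only [List.length_append, List.length_replicate]
      omega
    -- facts about sr, sc
    obtain ⟨hsr0, hsrlt, row, hrowg, hsceq, hscne⟩ :=
      pvFindStart_spec (grid.map (fun row => pvLjust row m '.')) 0 sr sc hfs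
    rw [List.length_map] at hsrlt
    have hinf : ("S" : String).toList <:+: row.toList :=
      (PySem.Str.find_ne_neg_one_iff row "S").mp hscne
    have hscnn : 0 ≤ sc := by
      rw [hsceq]
      exact (PySem.Str.find_nonneg_iff row "S").mpr hinf
    have hsclt : sc < m := by
      have hce : PySem.Str.find row "S" = PySem.Chars.find row.toList ("S" : String).toList :=
        PySem.Str.find_eq row "S"
      have hnn : 0 ≤ PySem.Chars.find row.toList ("S" : String).toList := by
        rw [← hce, ← hsceq]; exact hscnn
      have hpre' := (PySem.Chars.find_spec hnn).1
      have hlt : (PySem.Chars.find row.toList ("S" : String).toList).toNat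
          < row.toList.length := by
        by_contra hge
        rw [List.drop_eq_nil_of_le (by omega)] at hpre'
        have := List.prefix_nil.mp hpre'
        simp at this
      have hlen := hrowlen row hrowg
      rw [hsceq, hce]
      omega
    exact pvTop grid m (grid.map (fun row => pvLjust row m '.')) sr sc
      hsr0 (by simpa using hsrlt) hscnn hsclt
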